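-- pv_equiv track=rewrite | github.com/Chansazm/LeetCode | maximumDifferenceK.py | maximumDifferenceK
-- ===== SOURCE A (Python) =====
-- def maximumDifferenceK(nums, k):
--     nums.sort()
--     ans = 1
--     x = nums[0]
--     for i in range(len(nums)):
--         if nums[i] - x > k:
--             x = nums[i]
--             ans += 1
--
--     return ans
-- ===== SOURCE B (Python) =====
-- # Greedy group counting driven by binary search: one loop iteration per group
-- # instead of per element. Sorts nums in place, exactly like the original.
-- def maximumDifferenceK(nums, k):
--     nums.sort()
--     n = len(nums)
--     ans = 1
--     x = nums[0]
--     # first index with value > x + k (the first group holds every element <= x + k)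
--     i = _first_above(nums, x + k, 0, n)
--     while i < n:
--         ans += 1
--         x = nums[i]
--         i = _first_above(nums, x + k, i + 1, n)
--     return ans
--
-- def _first_above(nums, bound, lo, hi):
--     # binary search: first index in [lo, hi) whose value is > bound, else hi
--     while lo < hi:
--         mid = (lo + hi) // 2
--         if nums[mid] > bound:
--             hi = mid
--         else:
--             lo = mid + 1
--     return lo
-- ===== Notes on version B (the rewrite author's own statement) =====
-- stated objective: alternative
-- what changed: After the shared in-place sort, the per-element linear scan that advances the greedy anchor is replaced by a while loop that runs once per group, jumping to the next anchor with a hand-written binary search (first element more than k above the current anchor).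
import Mathlib
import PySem

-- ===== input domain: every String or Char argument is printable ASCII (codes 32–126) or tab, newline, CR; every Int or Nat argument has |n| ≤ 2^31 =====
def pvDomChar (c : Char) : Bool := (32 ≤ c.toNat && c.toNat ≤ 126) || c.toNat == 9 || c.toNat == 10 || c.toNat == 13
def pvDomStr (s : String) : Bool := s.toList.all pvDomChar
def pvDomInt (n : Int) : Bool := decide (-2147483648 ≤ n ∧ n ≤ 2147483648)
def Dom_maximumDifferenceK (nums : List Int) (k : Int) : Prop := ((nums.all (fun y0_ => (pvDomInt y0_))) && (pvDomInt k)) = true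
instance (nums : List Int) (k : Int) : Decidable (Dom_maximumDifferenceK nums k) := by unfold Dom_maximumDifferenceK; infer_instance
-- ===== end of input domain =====

-- B replaces A's per-element scan by a per-group loop driven by a hand-written
-- binary search over the sorted list (same sorted greedy value, one iteration per
-- group); both A and B sort `nums` in place in Python — the equivalence proved
-- here is about the return value.

-- ===== PORT A =====
-- A's loop body: if nums[i] - x > k then (ans+1, nums[i]) else (ans, x)
def stepA (k : Int) (p : Int × Int) (v : Int) : Int × Int :=
  if v - p.2 > k then (p.1 + 1, v) else p

def maximumDifferenceK (nums : List Int) (k : Int) : Int :=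
  let s := PySem.List.sorted nums (fun x => x) false
  match s with
  | [] => 0   -- unreachable under Pre_ (Python raises IndexError at nums[0])
  | x0 :: _ => (s.foldl (stepA k) (1, x0)).1

-- ===== PORT B =====
-- hand-written binary search from Source B: first index in [lo, hi) whose value is
-- > bound, else hi.  The fuel argument (always ≥ hi - lo at the call) is only a
-- totality device for the while loop; nums[mid] is in range whenever
-- lo < hi ≤ len, so the total form getD is exact here.
def firstAboveAux (s : List Int) (b : Int) : Nat → Nat → Nat → Nat
  | 0, lo, _ => lo
  | fuel + 1, lo, hi =>
    if lo < hi then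
      let mid := (lo + hi) / 2
      if s.getD mid 0 > b then firstAboveAux s b fuel lo mid
      else firstAboveAux s b fuel (mid + 1) hi
    else lo

def firstAbove (s : List Int) (bound : Int) (lo hi : Nat) : Nat :=
  firstAboveAux s bound (hi - lo) lo hi

-- the per-group while loop; fuel = s.length suffices since i strictly increases
def altLoopAux (s : List Int) (k : Int) : Nat → Int → Nat → Int
  | 0, ans, _ => ans
  | fuel + 1, ans, i =>
    if i < s.length then
      altLoopAux s k fuel (ans + 1) (firstAbove s (s.getD i 0 + k) (i + 1) s.length)
    else ans

def altLoop (s : List Int) (k : Int) (ans : Int) (i : Nat) : Int :=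
  altLoopAux s k s.length ans i

def maximumDifferenceK_alt (nums : List Int) (k : Int) : Int :=
  let s := PySem.List.sorted nums (fun x => x) false
  match s with
  | [] => 0   -- unreachable under Pre_ (Python raises IndexError at nums[0])
  | x0 :: _ => altLoop s k 1 (firstAbove s (x0 + k) 0 s.length)

-- ===== PRECONDITION & SPEC =====
-- Pre_ excludes only the empty list, on which both Pythons raise IndexError.
def Pre_maximumDifferenceK (nums : List Int) (k : Int) : Prop := nums ≠ []
instance (nums : List Int) (k : Int) : Decidable (Pre_maximumDifferenceK nums k) := by
  unfold Pre_maximumDifferenceK; infer_instance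

def pvWitness_maximumDifferenceK : List Int × Int := ([3, 1, 2], 1)

def Spec_maximumDifferenceK (nums : List Int) (k : Int) (out : Int) : Prop := out = maximumDifferenceK_alt nums k
instance (nums : List Int) (k : Int) (out : Int) : Decidable (Spec_maximumDifferenceK nums k out) := by unfold Spec_maximumDifferenceK; infer_instance

-- ===== CLAIM (what is proved, stated in full; the proofs are below) =====
def Claim_equal_maximumDifferenceK : Prop := ∀ (nums : List Int) (k : Int), Dom_maximumDifferenceK nums k → Pre_maximumDifferenceK nums k → Spec_maximumDifferenceK nums k (maximumDifferenceK nums k)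

-- ===== LEMMAS AND PROOFS =====

theorem le_firstAboveAux (s : List Int) (b : Int) :
    ∀ (fuel lo hi : Nat), lo ≤ firstAboveAux s b fuel lo hi := by
  intro fuel
  induction fuel with
  | zero => intro lo hi; exact le_refl _
  | succ f ih =>
    intro lo hi
    simp only [firstAboveAux]
    split
    · split
      · exact ih lo ((lo + hi) / 2)
      · have := ih ((lo + hi) / 2 + 1) hi
        omega
    · exact le_refl _

theorem le_firstAbove (s : List Int) (b : Int) (lo hi : Nat) :
    lo ≤ firstAbove s b lo hi := le_firstAboveAux s b (hi - lo) lo hi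

-- correctness of the binary search on a (getD-)monotone list
theorem firstAboveAux_spec (s : List Int) (b : Int)
    (hmono : ∀ p q : Nat, p ≤ q → q < s.length → s.getD p 0 ≤ s.getD q 0) :
    ∀ (fuel lo hi : Nat), hi - lo ≤ fuel → lo ≤ hi → hi ≤ s.length →
      firstAboveAux s b fuel lo hi ≤ hi ∧
        (∀ m, lo ≤ m → m < firstAboveAux s b fuel lo hi → s.getD m 0 ≤ b) ∧
        (firstAboveAux s b fuel lo hi < hi → b < s.getD (firstAboveAux s b fuel lo hi) 0) := by
  intro fuel
  induction fuel with
  | zero =>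
    intro lo hi hf hlh hhi
    simp only [firstAboveAux]
    exact ⟨hlh, fun m hm hm' => by omega, fun h => by omega⟩
  | succ f ih =>
    intro lo hi hf hlh hhi
    simp only [firstAboveAux]
    split
    case isTrue hlt =>
      by_cases hgt : s.getD ((lo + hi) / 2) 0 > b
      · rw [if_pos hgt]
        obtain ⟨h1, h2, h3⟩ := ih lo ((lo + hi) / 2) (by omega) (by omega) (by omega)
        refine ⟨by omega, h2, fun hj => ?_⟩
        rcases Nat.lt_or_ge (firstAboveAux s b f lo ((lo + hi) / 2)) ((lo + hi) / 2) with h | h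
        · exact h3 h
        · have hge := le_firstAboveAux s b f lo ((lo + hi) / 2)
          have heq : firstAboveAux s b f lo ((lo + hi) / 2) = (lo + hi) / 2 := by omega
          rw [heq]; exact hgt
      · rw [if_neg hgt]
        obtain ⟨h1, h2, h3⟩ := ih ((lo + hi) / 2 + 1) hi (by omega) (by omega) hhi
        refine ⟨h1, fun m hm hm' => ?_, h3⟩
        rcases Nat.lt_or_ge ((lo + hi) / 2) m with h | h
        · exact h2 m (by omega) hm'
        · have := hmono m ((lo + hi) / 2) h (by omega)
          omega
    case isFalse hge =>
      exact ⟨by omega, fun m hm hm' => by omega, fun h => by omega⟩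

theorem firstAbove_spec (s : List Int) (b : Int)
    (hmono : ∀ p q : Nat, p ≤ q → q < s.length → s.getD p 0 ≤ s.getD q 0)
    (lo hi : Nat) (hlh : lo ≤ hi) (hhi : hi ≤ s.length) :
    firstAbove s b lo hi ≤ hi ∧
      (∀ m, lo ≤ m → m < firstAbove s b lo hi → s.getD m 0 ≤ b) ∧
      (firstAbove s b lo hi < hi → b < s.getD (firstAbove s b lo hi) 0) :=
  firstAboveAux_spec s b hmono (hi - lo) lo hi (le_refl _) hlh hhi

-- elements within k of the anchor do not change A's fold state
theorem fold_skip (s : List Int) (k a x : Int) :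
    ∀ (i j : Nat), i ≤ j → j ≤ s.length →
      (∀ m, i ≤ m → m < j → s.getD m 0 ≤ x + k) →
      (s.drop i).foldl (stepA k) (a, x) = (s.drop j).foldl (stepA k) (a, x) := by
  intro i j
  induction j with
  | zero =>
    intro h1 _ _
    have : i = 0 := by omega
    rw [this]
  | succ j ih =>
    intro h1 h2 h3
    rcases Nat.lt_or_ge i (j + 1) with h | h
    · -- i ≤ j; first shrink [i, j+1) to [j, j+1) via ih, then fold one step
      have hjlen : j < s.length := by omega
      have hstep : (s.drop j).foldl (stepA k) (a, x)
          = (s.drop (j + 1)).foldl (stepA k) (a, x) := by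
        rw [List.drop_eq_getElem_cons hjlen]
        have hle : s[j] ≤ x + k := by
          have := h3 j (by omega) (by omega)
          rwa [List.getD_eq_getElem s 0 hjlen] at this
        simp only [List.foldl_cons, stepA]
        rw [if_neg (by omega)]
      rw [ih (by omega) (by omega) (fun m hm hm' => h3 m hm (by omega)), hstep]
    · have : i = j + 1 := by omega
      rw [this]

-- main loop correspondence: A's fold over the suffix from i equals B's loop at i,
-- provided the element at i (if any) starts a new group w.r.t. anchor x
theorem main_loop (s : List Int) (k : Int)
    (hmono : ∀ p q : Nat, p ≤ q → q < s.length → s.getD p 0 ≤ s.getD q 0) :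
    ∀ (fuel i : Nat) (a x : Int), s.length - i ≤ fuel → i ≤ s.length →
      (i < s.length → k < s.getD i 0 - x) →
      ((s.drop i).foldl (stepA k) (a, x)).1 = altLoopAux s k fuel a i := by
  intro fuel
  induction fuel with
  | zero =>
    intro i a x hd hi _
    have hlen : i = s.length := by omega
    simp only [altLoopAux]
    simp [hlen]
  | succ f ih =>
    intro i a x hd hi htrig
    simp only [altLoopAux]
    rcases Nat.lt_or_ge i s.length with hlt | hge
    · rw [if_pos hlt]
      have hxi := htrig hlt
      set xi := s.getD i 0 with hxi_def
      obtain ⟨hj1, hj2, hj3⟩ := firstAbove_spec s (xi + k) hmono (i + 1) s.length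
        (by omega) (le_refl _)
      set j := firstAbove s (xi + k) (i + 1) s.length with hj_def
      have hij : i + 1 ≤ j := by rw [hj_def]; exact le_firstAbove s (xi + k) (i + 1) s.length
      have hfold1 : (s.drop i).foldl (stepA k) (a, x)
          = (s.drop (i + 1)).foldl (stepA k) (a + 1, xi) := by
        rw [List.drop_eq_getElem_cons hlt]
        simp only [List.foldl_cons, stepA]
        rw [List.getD_eq_getElem s 0 hlt] at hxi_def
        rw [if_pos (by omega), ← hxi_def]
      have hskip := fold_skip s k (a + 1) xi (i + 1) j hij hj1 hj2
      rw [hfold1, hskip]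
      exact ih j (a + 1) xi (by omega) hj1 (fun hjlt => by have := hj3 hjlt; omega)
    · rw [if_neg (by omega)]
      have : s.drop i = [] := List.drop_eq_nil_of_le (by omega)
      simp [this]

-- ===== VERDICT (by name: the statement is the Claim_ definition above) =====
theorem maximumDifferenceK_spec : Claim_equal_maximumDifferenceK := by
  intro nums k _hdom hpre
  unfold Spec_maximumDifferenceK maximumDifferenceK maximumDifferenceK_alt
  cases hs : PySem.List.sorted nums (fun x => x) false with
  | nil => exact absurd ((PySem.List.sorted_eq_nil_iff nums (fun x => x) false).mp hs) hpre
  | cons x0 t =>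
    have hmono : ∀ p q : Nat, p ≤ q → q < (x0 :: t).length →
        (x0 :: t).getD p 0 ≤ (x0 :: t).getD q 0 := by
      intro p q hpq hq
      have hq' : q < (PySem.List.sorted nums (fun x => x) false).length := by
        rw [hs]; exact hq
      have hmm := PySem.List.sorted_id_getElem_mono nums hpq hq'
      rw [List.getD_eq_getElem _ 0 (by omega), List.getD_eq_getElem _ 0 hq]
      simpa [hs] using hmm
    obtain ⟨hj1, hj2, hj3⟩ := firstAbove_spec (x0 :: t) (x0 + k) hmono 0 (x0 :: t).length
      (by omega) (le_refl _)
    show (List.foldl (stepA k) (1, x0) (x0 :: t)).1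
        = altLoop (x0 :: t) k 1 (firstAbove (x0 :: t) (x0 + k) 0 (x0 :: t).length)
    have h1 : List.foldl (stepA k) (1, x0) (x0 :: t)
        = ((x0 :: t).drop (firstAbove (x0 :: t) (x0 + k) 0 (x0 :: t).length)).foldl
            (stepA k) (1, x0) := by
      have := fold_skip (x0 :: t) k 1 x0 0 (firstAbove (x0 :: t) (x0 + k) 0 (x0 :: t).length)
        (by omega) hj1 (fun m _ hm => hj2 m (by omega) hm)
      simpa using this
    rw [h1]
    exact main_loop (x0 :: t) k hmono (x0 :: t).length
      (firstAbove (x0 :: t) (x0 + k) 0 (x0 :: t).length) 1 x0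
      (by omega) hj1 (fun hlt => by have := hj3 hlt; omega)
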